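-- pv_equiv track=rewrite | github.com/Marquez-David/FUNDAMENTOS-PROGRAMACION | cifrado_arbitrario.py | codificacion
-- ===== SOURCE A (Python) =====
-- def codificacion(frase,ALFABETO,CODIF):
--
--     """ str, tupla,tupla -> str
--     OBJ: Codificar un str. """
--
--     palabra = frase.upper()
--
--     lista_palabra = []
--
--     nF = len(frase) #Numero letras de la frase
--
--     nA = len(ALFABETO) #Numero letras alfabeto
--
--     for i in range(nF): #Recorre la frase
--
--         for j in range(nA): #Recorre el alfabeto
--
--             if(palabra[i] == ALFABETO[j]):
--
--                 lista_palabra.append(CODIF[j])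
--
--     return ''.join(lista_palabra) # Convertir lista en str
-- ===== SOURCE B (Python) =====
-- def codificacion(frase, ALFABETO, CODIF):
--     # index: letter -> ascending list of positions j in ALFABETO (keeps duplicates)
--     idx = {}
--     for j in range(len(ALFABETO)):
--         idx.setdefault(ALFABETO[j], []).append(j)
--     out = []
--     for ch in frase.upper():
--         for j in idx.get(ch, []):
--             out.append(CODIF[j])
--     return ''.join(out)
-- ===== Notes on version B (the rewrite author's own statement) =====
-- stated objective: faster
-- what changed: Replaces the per-character scan of ALFABETO with a precomputed letter->index-list dictionary built once, then a single pass over the uppercased phrase.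
import Mathlib
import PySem

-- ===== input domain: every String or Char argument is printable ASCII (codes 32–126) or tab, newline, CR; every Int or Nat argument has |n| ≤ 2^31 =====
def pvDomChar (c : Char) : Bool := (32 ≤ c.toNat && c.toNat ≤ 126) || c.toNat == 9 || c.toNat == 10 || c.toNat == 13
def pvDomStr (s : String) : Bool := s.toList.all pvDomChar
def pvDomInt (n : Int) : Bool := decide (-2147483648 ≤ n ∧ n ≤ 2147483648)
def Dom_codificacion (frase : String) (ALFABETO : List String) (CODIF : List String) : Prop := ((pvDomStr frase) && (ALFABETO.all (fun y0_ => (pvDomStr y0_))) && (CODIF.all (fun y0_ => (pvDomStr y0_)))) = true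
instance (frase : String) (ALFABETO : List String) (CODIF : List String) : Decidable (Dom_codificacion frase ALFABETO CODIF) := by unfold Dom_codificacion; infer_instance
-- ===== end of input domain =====

-- B replaces A's per-character scan of ALFABETO by a letter→indices dictionary built once,
-- then a single pass over the uppercased phrase (objective: faster, O(nF+nA) vs O(nF*nA)).

-- ===== PORT A =====
def codificacion (frase : String) (ALFABETO : List String) (CODIF : List String) : String :=
  let palabra := PySem.Chars.upper frase.toList
  let nF := frase.toList.length
  let nA := ALFABETO.length
  let lista_palabra :=
    (List.range nF).foldl (fun acc i =>
      (List.range nA).foldl (fun acc2 j =>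
        if String.ofList [palabra.getD i ' '] == ALFABETO.getD j "" then
          acc2 ++ [CODIF.getD j ""]        -- CODIF[j]: out of range only outside Pre_
        else acc2) acc) []
  PySem.Str.join "" lista_palabra

-- ===== PORT B =====
-- the letter→list-of-indices dictionary (Source B's first loop: setdefault + append)
def codifIdx (ALFABETO : List String) : PySem.Dict String (List Nat) :=
  (List.range ALFABETO.length).foldl
    (fun d j => d.insert (ALFABETO.getD j "") (d.getD (ALFABETO.getD j "") [] ++ [j]))
    PySem.Dict.empty

def codificacion_alt (frase : String) (ALFABETO : List String) (CODIF : List String) : String :=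
  let idx := codifIdx ALFABETO
  let out :=
    (PySem.Chars.upper frase.toList).foldl (fun acc c =>
      (idx.getD (String.ofList [c]) []).foldl (fun acc2 j => acc2 ++ [CODIF.getD j ""]) acc) []
  PySem.Str.join "" out

-- ===== PRECONDITION & SPEC =====
-- Pre_ excludes exactly the inputs where Python A (and B) raise IndexError: a character of the
-- uppercased phrase matches ALFABETO[j] at a position j with no corresponding CODIF[j].
def Pre_codificacion (frase : String) (ALFABETO : List String) (CODIF : List String) : Prop :=
  ∀ j ∈ List.range ALFABETO.length, CODIF.length ≤ j →
    ∀ c ∈ PySem.Chars.upper frase.toList, String.ofList [c] ≠ ALFABETO.getD j ""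
instance (frase : String) (ALFABETO : List String) (CODIF : List String) : Decidable (Pre_codificacion frase ALFABETO CODIF) := by unfold Pre_codificacion; infer_instance

def pvWitness_codificacion : String × List String × List String := ("ab c", ["A", "B", "A"], ["0", "1", "2"])

def Spec_codificacion (frase : String) (ALFABETO : List String) (CODIF : List String) (out : String) : Prop := out = codificacion_alt frase ALFABETO CODIF
instance (frase : String) (ALFABETO : List String) (CODIF : List String) (out : String) : Decidable (Spec_codificacion frase ALFABETO CODIF out) := by unfold Spec_codificacion; infer_instance

-- ===== CLAIM (what is proved, stated in full; the proofs are below) =====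
def Claim_equal_codificacion : Prop := ∀ (frase : String) (ALFABETO : List String) (CODIF : List String), Dom_codificacion frase ALFABETO CODIF → Pre_codificacion frase ALFABETO CODIF → Spec_codificacion frase ALFABETO CODIF (codificacion frase ALFABETO CODIF)

-- ===== LEMMAS AND PROOFS =====

-- the dictionary maps t to the ascending list of positions of t in ALFABETO
theorem codifIdx_getD (al : List String) (t : String) :
    (codifIdx al).getD t [] = (List.range al.length).filter (fun j => al.getD j "" == t) := by
  unfold codifIdx
  generalize al.length = n
  induction n with
  | zero => simp [PySem.Dict.getD, PySem.Dict.get?, PySem.Dict.empty]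
  | succ n ih =>
    rw [List.range_succ, List.foldl_append, List.foldl_cons, List.foldl_nil,
        PySem.Dict.getD_insert, List.filter_append]
    by_cases h : t = al.getD n ""
    · subst h
      rw [if_pos rfl, ih]
      simp only [List.filter_cons, List.filter_nil, beq_self_eq_true, if_true]
    · have h' : (al.getD n "" == t) = false := by
        simp only [beq_eq_false_iff_ne, ne_eq]
        exact fun e => h e.symm
      rw [if_neg h, ih]
      simp only [List.filter_cons, List.filter_nil, h', Bool.false_eq_true, if_false,
        List.append_nil]

-- an index fold over getD is a fold over the list itself
theorem foldl_range_getD {α β : Type} (xs : List α) (d : α) (h : β → α → β) (init : β) :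
    (List.range xs.length).foldl (fun acc i => h acc (xs.getD i d)) init = xs.foldl h init := by
  induction xs using List.reverseRecOn generalizing init with
  | nil => simp
  | append_singleton ys y ih =>
    have hl : (ys ++ [y]).length = ys.length + 1 := by simp
    rw [hl, List.range_succ, List.foldl_append, List.foldl_append,
        PySem.List.foldl_congr_mem (List.range ys.length)
          (fun acc i => h acc ((ys ++ [y]).getD i d)) (fun acc i => h acc (ys.getD i d)) init
          (fun acc i hi => by
            show h acc ((ys ++ [y]).getD i d) = h acc (ys.getD i d)
            rw [List.getD_append ys [y] d i (List.mem_range.mp hi)]),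
        ih]
    simp

-- both bodies produce, for each character c, the same appended block
theorem body_eq (ALFABETO CODIF : List String) (c : Char) (acc : List String) :
    (List.range ALFABETO.length).foldl (fun acc2 j =>
        if String.ofList [c] == ALFABETO.getD j "" then acc2 ++ [CODIF.getD j ""] else acc2) acc
    = ((codifIdx ALFABETO).getD (String.ofList [c]) []).foldl
        (fun acc2 j => acc2 ++ [CODIF.getD j ""]) acc := by
  rw [PySem.List.foldl_append_if (fun j => String.ofList [c] == ALFABETO.getD j "")
        (fun j => CODIF.getD j "") _ acc,
      PySem.List.foldl_append_singleton_eq_map, codifIdx_getD]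
  have : (List.filter (fun j => String.ofList [c] == ALFABETO.getD j "") (List.range ALFABETO.length))
      = (List.filter (fun j => ALFABETO.getD j "" == String.ofList [c]) (List.range ALFABETO.length)) := by
    apply List.filter_congr
    intro j _
    exact Bool.beq_comm
  rw [this]

-- ===== VERDICT (by name: the statement is the Claim_ definition above) =====
theorem codificacion_spec : Claim_equal_codificacion := by
  intro frase ALFABETO CODIF _ _
  unfold Spec_codificacion codificacion codificacion_alt
  have hlen : frase.toList.length = (PySem.Chars.upper frase.toList).length := by
    simp [PySem.Chars.upper]
  simp only []
  rw [hlen, foldl_range_getD (PySem.Chars.upper frase.toList) ' '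
        (fun acc c => (List.range ALFABETO.length).foldl (fun acc2 j =>
          if String.ofList [c] == ALFABETO.getD j "" then acc2 ++ [CODIF.getD j ""] else acc2) acc) []]
  congr 1
  exact PySem.List.foldl_congr_mem _ _ _ []
    (fun acc c _ => body_eq ALFABETO CODIF c acc)
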